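-- pv_equiv track=rewrite | github.com/intrusionops/plextrac_peer_review_helper | utils.py | _ef_severity_alignment
-- ===== SOURCE A (Python) =====
-- from typing import Dict, List, Tuple
-- from typing import List, Dict, Tuple
--
-- _EF_SEV = ["critical", "high", "medium", "low", "informational"]
--
-- _EF_RANK = {s: i for i, s in enumerate(_EF_SEV)}
--
-- def _ef_max_sev(values: List[str]) -> str:
--     vals = [v for v in values if v in _EF_RANK]
--     if not vals: return ""
--     return min(vals, key=lambda s: _EF_RANK[s])  # smaller index = higher severity
--
-- def _ef_severity_alignment(summary_text: str, finding_severities: List[str]) -> Tuple[bool,str,str]: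
--     st = summary_text.lower()
--     summary_sevs = [s for s in _EF_SEV if s in st]
--     s_max = _ef_max_sev(summary_sevs)
--     f_max = _ef_max_sev([s.lower() for s in finding_severities if s])
--     if not f_max:  # no severities recorded in findings → treat as aligned
--         return True, s_max or "", f_max or ""
--     if not s_max:
--         return False, "", f_max
--     return _EF_RANK[s_max] <= _EF_RANK[f_max], s_max, f_max
-- ===== SOURCE B (Python) =====
-- _EF_SEV = ["critical", "high", "medium", "low", "informational"]
--
-- def _ef_severity_alignment(summary_text, finding_severities):
--     st = summary_text.lower()
--     fset = {s.lower() for s in finding_severities}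
--     s_max = ""
--     f_max = ""
--     ok = False
--     for sev in _EF_SEV:  # scan from most to least severe: first hit is the max
--         if not s_max and sev in st:
--             s_max = sev
--             if not f_max:
--                 ok = True  # summary max found no later than findings max
--         if not f_max and sev in fset:
--             f_max = sev
--     if not f_max:
--         return True, s_max, f_max
--     if not s_max:
--         return False, "", f_max
--     return ok, s_max, f_max
-- ===== Notes on version B (the rewrite author's own statement) =====
-- stated objective: simpler
-- what changed: Drops the _EF_RANK dict, the _ef_max_sev helper and min(..., key=rank): one ordered scan of the canonical severity list (high to low) picks both maxima as the first severity present and decides alignment on the fly by which maximum is encountered first.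
import Mathlib
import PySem

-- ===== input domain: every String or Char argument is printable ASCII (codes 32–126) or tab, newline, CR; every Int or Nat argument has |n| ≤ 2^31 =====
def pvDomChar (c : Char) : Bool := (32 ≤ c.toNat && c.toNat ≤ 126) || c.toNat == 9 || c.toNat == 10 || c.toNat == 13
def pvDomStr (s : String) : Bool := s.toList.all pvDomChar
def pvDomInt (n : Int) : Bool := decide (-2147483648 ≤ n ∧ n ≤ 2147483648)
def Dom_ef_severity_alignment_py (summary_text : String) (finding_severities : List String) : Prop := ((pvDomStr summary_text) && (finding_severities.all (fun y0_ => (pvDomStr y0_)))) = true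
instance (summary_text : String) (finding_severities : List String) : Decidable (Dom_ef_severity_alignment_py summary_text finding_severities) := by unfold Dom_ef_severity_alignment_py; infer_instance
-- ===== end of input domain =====

-- B drops the rank dict and the min-by-rank helper: one ordered scan of the canonical
-- severity list picks both maxima and decides alignment on the fly (objective: simpler/idiomatic).

-- ===== PORT A =====
def efSev : List String := ["critical", "high", "medium", "low", "informational"]

-- _EF_RANK = {s: i for i, s in enumerate(_EF_SEV)}
def efRank : PySem.Dict String Int :=
  (PySem.List.enumerate efSev).foldl (fun d p => d.insert p.2 p.1) PySem.Dict.empty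

def efMaxSev (values : List String) : String :=
  let vals := values.filter (fun v => efRank.contains v)
  if vals = [] then ""
  else (PySem.List.min? vals (fun s => efRank.getD s 0)).getD ""

def ef_severity_alignment_py (summary_text : String) (finding_severities : List String) : Bool × String × String :=
  let st := PySem.Str.lower summary_text
  let summary_sevs := efSev.filter (fun s => PySem.Str.isIn s st)
  let s_max := efMaxSev summary_sevs
  let f_max := efMaxSev ((finding_severities.filter (fun s => s ≠ "")).map PySem.Str.lower)
  if f_max = "" then (true, s_max, f_max)
  else if s_max = "" then (false, "", f_max)
  else (decide (efRank.getD s_max 0 ≤ efRank.getD f_max 0), s_max, f_max)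

-- ===== PORT B =====
def efSevB : List String := ["critical", "high", "medium", "low", "informational"]

def altStep (st : String) (fset : PySem.Set String) (acc : String × String × Bool) (sev : String) : String × String × Bool :=
  let sok := if acc.1 = "" ∧ PySem.Str.isIn sev st then (sev, if acc.2.1 = "" then true else acc.2.2) else (acc.1, acc.2.2)
  let f' := if acc.2.1 = "" ∧ PySem.Set.contains fset sev then sev else acc.2.1
  (sok.1, f', sok.2)

def ef_severity_alignment_py_alt (summary_text : String) (finding_severities : List String) : Bool × String × String :=
  let st := PySem.Str.lower summary_text
  let fset := PySem.Set.ofList (finding_severities.map PySem.Str.lower)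
  let r := efSevB.foldl (altStep st fset) ("", "", false)
  if r.2.1 = "" then (true, r.1, r.2.1)
  else if r.1 = "" then (false, "", r.2.1)
  else (r.2.2, r.1, r.2.1)

-- ===== PRECONDITION & SPEC =====
def Spec_ef_severity_alignment_py (summary_text : String) (finding_severities : List String) (out : Bool × String × String) : Prop := out = ef_severity_alignment_py_alt summary_text finding_severities
instance (summary_text : String) (finding_severities : List String) (out : Bool × String × String) : Decidable (Spec_ef_severity_alignment_py summary_text finding_severities out) := by unfold Spec_ef_severity_alignment_py; infer_instance

-- ===== CLAIM (what is proved, stated in full; the proofs are below) =====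
def Claim_equal_ef_severity_alignment_py : Prop := ∀ (summary_text : String) (finding_severities : List String), Dom_ef_severity_alignment_py summary_text finding_severities → Spec_ef_severity_alignment_py summary_text finding_severities (ef_severity_alignment_py summary_text finding_severities)

-- ===== LEMMAS AND PROOFS =====

theorem efRank_keys : efRank.keys = efSev := by decide

theorem efRank_contains (v : String) : efRank.contains v = decide (v ∈ efSev) := by
  rw [PySem.Dict.contains_eq_decide_mem_keys, efRank_keys]

-- A's min-by-rank returns s when s is present and no more severe value is present.
theorem min_rank_eq (ws : List String) (s : String) (hsev : s ∈ efSev) (hs : s ∈ ws)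
    (hmin : ∀ t ∈ efSev, efRank.getD t 0 < efRank.getD s 0 → t ∉ ws) :
    efMaxSev ws = s := by
  unfold efMaxSev
  set vals := ws.filter (fun v => efRank.contains v) with hv
  have hmem : ∀ v, v ∈ vals ↔ v ∈ ws ∧ v ∈ efSev := by
    intro v; simp [hv, List.mem_filter, efRank_contains]
  have hsvals : s ∈ vals := (hmem s).2 ⟨hs, hsev⟩
  have hne : vals ≠ [] := fun h => by simp [h] at hsvals
  rw [if_neg hne]
  obtain ⟨m, hm⟩ : ∃ m, PySem.List.min? vals (fun u => efRank.getD u 0) = some m := by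
    cases hmq : PySem.List.min? vals (fun u => efRank.getD u 0) with
    | none => exact absurd ((PySem.List.min?_eq_none_iff _ _).mp hmq) hne
    | some m => exact ⟨m, rfl⟩
  rw [hm]
  have hmw := (hmem m).1 (PySem.List.min?_mem hm)
  have hle : efRank.getD m 0 ≤ efRank.getD s 0 := PySem.List.min?_isMin hm s hsvals
  have hnlt : ¬ efRank.getD m 0 < efRank.getD s 0 := fun hlt => hmin m hmw.2 hlt hmw.1
  have heq : efRank.getD m 0 = efRank.getD s 0 := le_antisymm hle (not_lt.mp hnlt)
  simp only [Option.getD_some]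
  rcases (by simpa [efSev] using hmw.2 : _) with rfl|rfl|rfl|rfl|rfl <;>
    rcases (by simpa [efSev] using hsev : _) with rfl|rfl|rfl|rfl|rfl <;>
    first | rfl | (exfalso; revert heq; decide)

-- characterisation of A's helper as a first-present ordered scan
theorem efMaxSev_eq (ws : List String) :
    efMaxSev ws =
      if "critical" ∈ ws then "critical"
      else if "high" ∈ ws then "high"
      else if "medium" ∈ ws then "medium"
      else if "low" ∈ ws then "low"
      else if "informational" ∈ ws then "informational"
      else "" := by
  split_ifs with h0 h1 h2 h3 h4
  · exact min_rank_eq ws _ (by decide) h0 (by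
      intro t ht hlt
      rcases (by simpa [efSev] using ht : _) with rfl|rfl|rfl|rfl|rfl <;> exact absurd hlt (by decide))
  · refine min_rank_eq ws _ (by decide) h1 ?_
    intro t ht hlt
    rcases (by simpa [efSev] using ht : _) with rfl|rfl|rfl|rfl|rfl <;>
      first | exact h0 | exact absurd hlt (by decide)
  · refine min_rank_eq ws _ (by decide) h2 ?_
    intro t ht hlt
    rcases (by simpa [efSev] using ht : _) with rfl|rfl|rfl|rfl|rfl <;>
      first | exact h0 | exact h1 | exact absurd hlt (by decide)
  · refine min_rank_eq ws _ (by decide) h3 ?_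
    intro t ht hlt
    rcases (by simpa [efSev] using ht : _) with rfl|rfl|rfl|rfl|rfl <;>
      first | exact h0 | exact h1 | exact h2 | exact absurd hlt (by decide)
  · refine min_rank_eq ws _ (by decide) h4 ?_
    intro t ht hlt
    rcases (by simpa [efSev] using ht : _) with rfl|rfl|rfl|rfl|rfl <;>
      first | exact h0 | exact h1 | exact h2 | exact h3 | exact absurd hlt (by decide)
  · unfold efMaxSev
    have hnil : ws.filter (fun v => efRank.contains v) = [] := by
      rw [List.filter_eq_nil_iff]
      intro v hv
      rw [efRank_contains]
      simp only [decide_eq_true_eq]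
      intro hmem
      rcases (by simpa [efSev] using hmem : _) with rfl|rfl|rfl|rfl|rfl <;>
        first | exact h0 hv | exact h1 hv | exact h2 hv | exact h3 hv | exact h4 hv
    simp [hnil]

-- abstract result of A as a function of the ten membership booleans
def chainA (b0 b1 b2 b3 b4 c0 c1 c2 c3 c4 : Bool) : Bool × String × String :=
  let s_max := if b0 then "critical" else if b1 then "high" else if b2 then "medium" else if b3 then "low" else if b4 then "informational" else ""
  let f_max := if c0 then "critical" else if c1 then "high" else if c2 then "medium" else if c3 then "low" else if c4 then "informational" else ""
  if f_max = "" then (true, s_max, f_max)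
  else if s_max = "" then (false, "", f_max)
  else (decide (efRank.getD s_max 0 ≤ efRank.getD f_max 0), s_max, f_max)

-- abstract result of B as a function of the same booleans
def chainBstep (acc : String × String × Bool) (p : String × Bool × Bool) : String × String × Bool :=
  let sok := if acc.1 = "" ∧ p.2.1 = true then (p.1, if acc.2.1 = "" then true else acc.2.2) else (acc.1, acc.2.2)
  let f' := if acc.2.1 = "" ∧ p.2.2 = true then p.1 else acc.2.1
  (sok.1, f', sok.2)

def chainB (b0 b1 b2 b3 b4 c0 c1 c2 c3 c4 : Bool) : Bool × String × String :=
  let r := ([("critical", b0, c0), ("high", b1, c1), ("medium", b2, c2), ("low", b3, c3),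
      ("informational", b4, c4)] : List (String × Bool × Bool)).foldl chainBstep ("", "", false)
  if r.2.1 = "" then (true, r.1, r.2.1)
  else if r.1 = "" then (false, "", r.2.1)
  else (r.2.2, r.1, r.2.1)

theorem chainA_eq_chainB : ∀ b0 b1 b2 b3 b4 c0 c1 c2 c3 c4 : Bool,
    chainA b0 b1 b2 b3 b4 c0 c1 c2 c3 c4 = chainB b0 b1 b2 b3 b4 c0 c1 c2 c3 c4 := by decide

theorem mem_lower_filter (fs : List String) (s : String) (hs : s ≠ "") :
    (s ∈ (fs.filter (fun x => x ≠ "")).map PySem.Str.lower) ↔ s ∈ fs.map PySem.Str.lower := by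
  simp only [List.mem_map, List.mem_filter, decide_eq_true_eq]
  constructor
  · rintro ⟨x, ⟨hx, _⟩, rfl⟩; exact ⟨x, hx, rfl⟩
  · rintro ⟨x, hx, rfl⟩
    refine ⟨x, ⟨hx, ?_⟩, rfl⟩
    rintro rfl
    exact hs rfl

theorem set_contains_ofList (l : List String) (x : String) :
    PySem.Set.contains (PySem.Set.ofList l) x = decide (x ∈ l) := by
  by_cases h : x ∈ l
  · have hc : (PySem.Set.ofList l).contains x = true :=
      (PySem.Set.contains_iff _ _).mpr ((PySem.Set.mem_ofList _ _).mpr h)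
    rw [hc]
    simp [h]
  · have hc : ¬ (PySem.Set.ofList l).contains x = true :=
      fun hc => h ((PySem.Set.mem_ofList _ _).mp ((PySem.Set.contains_iff _ _).mp hc))
    simp only [Bool.not_eq_true] at hc
    simp [h]


theorem A_eq_chainA (st : String) (fs : List String) :
    ef_severity_alignment_py st fs =
      chainA (PySem.Str.isIn "critical" (PySem.Str.lower st)) (PySem.Str.isIn "high" (PySem.Str.lower st))
        (PySem.Str.isIn "medium" (PySem.Str.lower st)) (PySem.Str.isIn "low" (PySem.Str.lower st))
        (PySem.Str.isIn "informational" (PySem.Str.lower st))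
        (decide ("critical" ∈ fs.map PySem.Str.lower)) (decide ("high" ∈ fs.map PySem.Str.lower))
        (decide ("medium" ∈ fs.map PySem.Str.lower)) (decide ("low" ∈ fs.map PySem.Str.lower))
        (decide ("informational" ∈ fs.map PySem.Str.lower)) := by
  unfold ef_severity_alignment_py chainA
  simp only [efMaxSev_eq, List.mem_filter,
    mem_lower_filter fs "critical" (by decide), mem_lower_filter fs "high" (by decide),
    mem_lower_filter fs "medium" (by decide), mem_lower_filter fs "low" (by decide),
    mem_lower_filter fs "informational" (by decide)]
  simp [efSev]

theorem fold_bridge (st : String) (fset : PySem.Set String) :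
    ∀ (l : List (String × Bool × Bool)) (init : String × String × Bool),
      (∀ p ∈ l, PySem.Str.isIn p.1 st = p.2.1 ∧ PySem.Set.contains fset p.1 = p.2.2) →
      (l.map (fun p => p.1)).foldl (altStep st fset) init = l.foldl chainBstep init := by
  intro l
  induction l with
  | nil => intro init _; rfl
  | cons p t ih =>
    intro init hl
    simp only [List.map_cons, List.foldl_cons]
    have hstep : altStep st fset init p.1 = chainBstep init p := by
      unfold altStep chainBstep
      rw [(hl p (by simp)).1, (hl p (by simp)).2]
    rw [hstep]
    exact ih _ (fun q hq => hl q (by simp [hq]))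

set_option maxHeartbeats 1000000 in
theorem B_eq_chainB (st : String) (fs : List String) :
    ef_severity_alignment_py_alt st fs =
      chainB (PySem.Str.isIn "critical" (PySem.Str.lower st)) (PySem.Str.isIn "high" (PySem.Str.lower st))
        (PySem.Str.isIn "medium" (PySem.Str.lower st)) (PySem.Str.isIn "low" (PySem.Str.lower st))
        (PySem.Str.isIn "informational" (PySem.Str.lower st))
        (PySem.Set.contains (PySem.Set.ofList (fs.map PySem.Str.lower)) "critical")
        (PySem.Set.contains (PySem.Set.ofList (fs.map PySem.Str.lower)) "high")
        (PySem.Set.contains (PySem.Set.ofList (fs.map PySem.Str.lower)) "medium")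
        (PySem.Set.contains (PySem.Set.ofList (fs.map PySem.Str.lower)) "low")
        (PySem.Set.contains (PySem.Set.ofList (fs.map PySem.Str.lower)) "informational") := by
  unfold ef_severity_alignment_py_alt chainB
  have h := fold_bridge (PySem.Str.lower st) (PySem.Set.ofList (fs.map PySem.Str.lower))
    ([("critical", PySem.Str.isIn "critical" (PySem.Str.lower st),
        PySem.Set.contains (PySem.Set.ofList (fs.map PySem.Str.lower)) "critical"),
      ("high", PySem.Str.isIn "high" (PySem.Str.lower st),
        PySem.Set.contains (PySem.Set.ofList (fs.map PySem.Str.lower)) "high"),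
      ("medium", PySem.Str.isIn "medium" (PySem.Str.lower st),
        PySem.Set.contains (PySem.Set.ofList (fs.map PySem.Str.lower)) "medium"),
      ("low", PySem.Str.isIn "low" (PySem.Str.lower st),
        PySem.Set.contains (PySem.Set.ofList (fs.map PySem.Str.lower)) "low"),
      ("informational", PySem.Str.isIn "informational" (PySem.Str.lower st),
        PySem.Set.contains (PySem.Set.ofList (fs.map PySem.Str.lower)) "informational")])
    ("", "", false) (by
      intro p hp
      simp only [List.mem_cons, List.not_mem_nil, or_false] at hp
      rcases hp with rfl | rfl | rfl | rfl | rfl <;> exact ⟨rfl, rfl⟩)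
  simp only [List.map_cons, List.map_nil] at h
  simp only [efSevB, h]

-- ===== VERDICT (by name: the statement is the Claim_ definition above) =====
theorem ef_severity_alignment_py_spec : Claim_equal_ef_severity_alignment_py := by
  intro st fs _
  unfold Spec_ef_severity_alignment_py
  rw [A_eq_chainA, B_eq_chainB]
  simp only [set_contains_ofList]
  exact chainA_eq_chainB _ _ _ _ _ _ _ _ _ _
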